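-- pv_equiv track=rewrite | github.com/subhanga/Konane | player.py | jumppath
-- ===== SOURCE A (Python) =====
-- def jumppath(lorow, locol, hirow, hicol):
--     if lorow == hirow:
--         jump_over = [(hirow, j) for j in range(locol+1, hicol, 2)]
--         jump_land = [(hirow, j) for j in range(locol+2, hicol, 2)]
--         return (jump_over, jump_land)
--     elif locol == hicol:
--         jump_over = [(i, hicol) for i in range(lorow+1, hirow, 2)]
--         jump_land = [(i, hicol) for i in range(lorow+2, hirow, 2)]
--         return (jump_over, jump_land)
--     else:
--         return (None, None)
-- ===== SOURCE B (Python) =====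
-- def _split(lo, hi, make):
--     # one interleaved pass: odd distance from lo -> jump_over, even -> jump_land
--     over, land = [], []
--     for v in range(lo + 1, hi):
--         if (v - lo) % 2 == 1:
--             over.append(make(v))
--         else:
--             land.append(make(v))
--     return (over, land)
--
--
-- def jumppath(lorow, locol, hirow, hicol):
--     if lorow == hirow:
--         return _split(locol, hicol, lambda j: (hirow, j))
--     elif locol == hicol:
--         return _split(lorow, hirow, lambda i: (i, hicol))
--     else:
--         return (None, None)
-- ===== Notes on version B (the rewrite author's own statement) =====
-- stated objective: alternative
-- what changed: Replaces the two step-2 range comprehensions per branch with a single shared helper that walks every coordinate between the endpoints once and routes each cell to jump_over or jump_land by the parity of its distance from the low endpoint.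
import Mathlib
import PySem

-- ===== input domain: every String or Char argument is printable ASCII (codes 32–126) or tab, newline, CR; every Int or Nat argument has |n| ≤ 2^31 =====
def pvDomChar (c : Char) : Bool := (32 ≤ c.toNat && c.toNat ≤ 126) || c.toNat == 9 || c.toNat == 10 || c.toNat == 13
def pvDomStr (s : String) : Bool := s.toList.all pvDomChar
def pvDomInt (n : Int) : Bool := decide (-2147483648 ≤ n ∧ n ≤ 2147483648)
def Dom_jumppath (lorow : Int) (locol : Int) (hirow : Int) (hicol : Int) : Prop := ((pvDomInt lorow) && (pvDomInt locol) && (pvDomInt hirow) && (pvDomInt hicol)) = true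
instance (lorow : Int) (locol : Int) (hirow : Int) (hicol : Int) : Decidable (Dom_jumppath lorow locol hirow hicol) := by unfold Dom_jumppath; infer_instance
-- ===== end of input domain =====

-- B replaces A's two step-2 range comprehensions per branch by one interleaved pass over every
-- coordinate between the endpoints, routing each cell by the parity of its distance from the low
-- endpoint (objective: alternative decomposition, same cost).

-- ===== PORT A =====
def jumppath (lorow : Int) (locol : Int) (hirow : Int) (hicol : Int) : (Option (List (Int × Int))) × (Option (List (Int × Int))) :=
  if lorow = hirow then
    (some ((PySem.List.pyRange (locol + 1) hicol 2).map (fun j => (hirow, j))),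
     some ((PySem.List.pyRange (locol + 2) hicol 2).map (fun j => (hirow, j))))
  else if locol = hicol then
    (some ((PySem.List.pyRange (lorow + 1) hirow 2).map (fun i => (i, hicol))),
     some ((PySem.List.pyRange (lorow + 2) hirow 2).map (fun i => (i, hicol))))
  else (none, none)

-- ===== PORT B =====
-- helper _split of Source B: one pass, appending to over on odd distance from lo, to land on even
def pvSplit (lo : Int) (hi : Int) (mk : Int → Int × Int) : List (Int × Int) × List (Int × Int) :=
  (PySem.List.pyRange (lo + 1) hi 1).foldl
    (fun acc v => if PySem.Int.mod (v - lo) 2 = 1 then (acc.1 ++ [mk v], acc.2) else (acc.1, acc.2 ++ [mk v]))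
    ([], [])

def jumppath_alt (lorow : Int) (locol : Int) (hirow : Int) (hicol : Int) : (Option (List (Int × Int))) × (Option (List (Int × Int))) :=
  if lorow = hirow then
    let p := pvSplit locol hicol (fun j => (hirow, j))
    (some p.1, some p.2)
  else if locol = hicol then
    let p := pvSplit lorow hirow (fun i => (i, hicol))
    (some p.1, some p.2)
  else (none, none)

-- ===== PRECONDITION & SPEC =====
def Spec_jumppath (lorow : Int) (locol : Int) (hirow : Int) (hicol : Int) (out : (Option (List (Int × Int))) × (Option (List (Int × Int)))) : Prop := out = jumppath_alt lorow locol hirow hicol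
instance (lorow : Int) (locol : Int) (hirow : Int) (hicol : Int) (out : (Option (List (Int × Int))) × (Option (List (Int × Int)))) : Decidable (Spec_jumppath lorow locol hirow hicol out) := by unfold Spec_jumppath; infer_instance

-- ===== CLAIM (what is proved, stated in full; the proofs are below) =====
def Claim_equal_jumppath : Prop := ∀ (lorow : Int) (locol : Int) (hirow : Int) (hicol : Int), Dom_jumppath lorow locol hirow hicol → Spec_jumppath lorow locol hirow hicol (jumppath lorow locol hirow hicol)

-- ===== LEMMAS AND PROOFS =====

-- step-2 range: empty and cons unfoldings (derived from PySem.List.pyRange_of_pos)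
theorem pr2_nil {a b : Int} (h : b ≤ a) : PySem.List.pyRange a b 2 = [] := by
  rw [PySem.List.pyRange_of_pos a b (by norm_num)]
  rw [if_neg (by omega)]
  simp

theorem pr2_cons {a b : Int} (h : a < b) :
    PySem.List.pyRange a b 2 = a :: PySem.List.pyRange (a + 2) b 2 := by
  rw [PySem.List.pyRange_of_pos a b (by norm_num),
      PySem.List.pyRange_of_pos (a + 2) b (by norm_num)]
  rw [if_pos h]
  have hn : ((b - a + 2 - 1) / 2).toNat
      = (if a + 2 < b then ((b - (a + 2) + 2 - 1) / 2).toNat else 0) + 1 := by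
    split_ifs with h2 <;> omega
  rw [hn, List.range_succ_eq_map]
  simp only [List.map_cons, List.map_map]
  refine congrArg₂ List.cons (by push_cast; ring) ?_
  apply List.map_congr_left
  intro k _
  simp only [Function.comp_apply, Nat.succ_eq_add_one]
  push_cast
  ring

-- the pair fold of pvSplit is "filter odd, filter even", each mapped through mk
theorem fold_split (mk : Int → Int × Int) (lo : Int) :
    ∀ (l : List Int) (o d : List (Int × Int)),
      l.foldl (fun acc v => if PySem.Int.mod (v - lo) 2 = 1 then (acc.1 ++ [mk v], acc.2)
                            else (acc.1, acc.2 ++ [mk v])) (o, d)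
      = (o ++ (l.filter (fun v => decide (PySem.Int.mod (v - lo) 2 = 1))).map mk,
         d ++ (l.filter (fun v => !decide (PySem.Int.mod (v - lo) 2 = 1))).map mk) := by
  intro l
  induction l with
  | nil => intro o d; simp
  | cons x xs ih =>
    intro o d
    simp only [List.foldl_cons, List.filter_cons]
    by_cases hx : PySem.Int.mod (x - lo) 2 = 1
    · simp only [hx, decide_true, Bool.not_true, Bool.false_eq_true, if_true,
        if_false, ih, List.map_cons, List.append_assoc, List.singleton_append]
    · simp only [hx, decide_false, Bool.not_false, Bool.false_eq_true, if_true,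
        if_false, ih, List.map_cons, List.append_assoc, List.singleton_append]

-- filtering the step-1 range by parity of the distance from lo gives a step-2 range
theorem filt_odd : ∀ (n : Nat) (a b lo : Int), (b - a).toNat = n →
    (PySem.List.pyRange a b 1).filter (fun v => decide (PySem.Int.mod (v - lo) 2 = 1))
    = if (a - lo) % 2 = 1 then PySem.List.pyRange a b 2 else PySem.List.pyRange (a + 1) b 2 := by
  intro n
  induction n with
  | zero =>
    intro a b lo h
    have hba : b ≤ a := by omega
    rw [PySem.List.pyRange_one_eq_nil hba, pr2_nil hba, pr2_nil (by omega)]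
    simp
  | succ m ih =>
    intro a b lo h
    have hab : a < b := by omega
    rw [PySem.List.pyRange_one_cons hab]
    have ihs := ih (a + 1) b lo (by omega)
    by_cases hp : (a - lo) % 2 = 1
    · have hp1 : ¬ (a + 1 - lo) % 2 = 1 := by omega
      rw [if_pos hp]
      rw [List.filter_cons_of_pos (by simp [hp]), ihs, if_neg hp1]
      rw [pr2_cons hab]
      ring_nf
    · have hp1 : (a + 1 - lo) % 2 = 1 := by omega
      rw [if_neg hp]
      rw [List.filter_cons_of_neg (by simp [hp]), ihs, if_pos hp1]

theorem filt_even : ∀ (n : Nat) (a b lo : Int), (b - a).toNat = n →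
    (PySem.List.pyRange a b 1).filter (fun v => !decide (PySem.Int.mod (v - lo) 2 = 1))
    = if (a - lo) % 2 = 1 then PySem.List.pyRange (a + 1) b 2 else PySem.List.pyRange a b 2 := by
  intro n
  induction n with
  | zero =>
    intro a b lo h
    have hba : b ≤ a := by omega
    rw [PySem.List.pyRange_one_eq_nil hba, pr2_nil hba, pr2_nil (by omega)]
    simp
  | succ m ih =>
    intro a b lo h
    have hab : a < b := by omega
    rw [PySem.List.pyRange_one_cons hab]
    have ihs := ih (a + 1) b lo (by omega)
    by_cases hp : (a - lo) % 2 = 1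
    · have hp1 : ¬ (a + 1 - lo) % 2 = 1 := by omega
      rw [if_pos hp]
      rw [List.filter_cons_of_neg (by simp [hp]), ihs, if_neg hp1]
    · have hp1 : (a + 1 - lo) % 2 = 1 := by omega
      rw [if_neg hp]
      rw [List.filter_cons_of_pos (by simp [hp]), ihs, if_pos hp1]
      rw [pr2_cons hab]
      ring_nf

-- pvSplit computes exactly A's two step-2 ranges
theorem pvSplit_eq (lo hi : Int) (mk : Int → Int × Int) :
    pvSplit lo hi mk = ((PySem.List.pyRange (lo + 1) hi 2).map mk,
                        (PySem.List.pyRange (lo + 2) hi 2).map mk) := by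
  unfold pvSplit
  rw [fold_split]
  have h1 := filt_odd (hi - (lo + 1)).toNat (lo + 1) hi lo rfl
  have h2 := filt_even (hi - (lo + 1)).toNat (lo + 1) hi lo rfl
  have hpar : (lo + 1 - lo) % 2 = 1 := by omega
  have h3 : lo + 1 + 1 = lo + 2 := by ring
  rw [h1, h2, if_pos hpar, if_pos hpar, h3, List.nil_append, List.nil_append]

-- ===== VERDICT (by name: the statement is the Claim_ definition above) =====
theorem jumppath_spec : Claim_equal_jumppath := by
  intro lorow locol hirow hicol _
  unfold Spec_jumppath jumppath jumppath_alt
  by_cases h1 : lorow = hirow <;> by_cases h2 : locol = hicol <;>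
    simp [h1, h2, pvSplit_eq]
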